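-- pv_equiv track=rewrite | github.com/captainconj/selah | dev/scripts/spy_phonetic_genome.py | longest_exact_match
-- ===== SOURCE A (Python) =====
-- def compute_kmers(seq, k):
--     """Extract all k-mers from a sequence, returning a set."""
--     kmers = set()
--     for i in range(len(seq) - k + 1):
--         kmers.add(seq[i:i+k])
--     return kmers
--
-- def find_shared_kmers(seq1, seq2, k):
--     """Find k-mers shared between two sequences."""
--     kmers1 = compute_kmers(seq1, k)
--     kmers2 = compute_kmers(seq2, k)
--     return kmers1 & kmers2
--
-- def longest_exact_match(seq1, seq2, min_k=10, max_k=30):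
--     """Find the longest exact match between two sequences by binary-ish search."""
--     best_k = 0
--     best_shared = set()
--
--     for k in range(min_k, max_k + 1):
--         shared = find_shared_kmers(seq1, seq2, k)
--         if shared:
--             best_k = k
--             best_shared = shared
--         else:
--             break
--
--     return best_k, best_shared
-- ===== SOURCE B (Python) =====
-- def longest_exact_match(seq1, seq2, min_k=10, max_k=30):
--     """Binary search over k (shared-kmer existence is monotone in k), computing
--     shared k-mers with a single pass over seq1 against a set of seq2's k-mers."""
--     def shared_kmers(k):
--         window2 = {seq2[i:i+k] for i in range(len(seq2) - k + 1)}
--         out = set()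
--         for i in range(len(seq1) - k + 1):
--             w = seq1[i:i+k]
--             if w in window2:
--                 out.add(w)
--         return out
--
--     if min_k > max_k or not shared_kmers(min_k):
--         return 0, set()
--     lo, hi = min_k, max_k
--     while lo < hi:
--         mid = (lo + hi + 1) // 2
--         if shared_kmers(mid):
--             lo = mid
--         else:
--             hi = mid - 1
--     return lo, shared_kmers(lo)
-- ===== Notes on version B (the rewrite author's own statement) =====
-- stated objective: faster
-- what changed: Replaces A's linear scan over k (computing two k-mer sets and intersecting at every k until the first empty intersection) by a binary search over k, exploiting that existence of a shared k-mer is monotone in k, and computes each shared-k-mer set in one pass over seq1 against a set of seq2's k-mers instead of building and intersecting two sets.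
import Mathlib
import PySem

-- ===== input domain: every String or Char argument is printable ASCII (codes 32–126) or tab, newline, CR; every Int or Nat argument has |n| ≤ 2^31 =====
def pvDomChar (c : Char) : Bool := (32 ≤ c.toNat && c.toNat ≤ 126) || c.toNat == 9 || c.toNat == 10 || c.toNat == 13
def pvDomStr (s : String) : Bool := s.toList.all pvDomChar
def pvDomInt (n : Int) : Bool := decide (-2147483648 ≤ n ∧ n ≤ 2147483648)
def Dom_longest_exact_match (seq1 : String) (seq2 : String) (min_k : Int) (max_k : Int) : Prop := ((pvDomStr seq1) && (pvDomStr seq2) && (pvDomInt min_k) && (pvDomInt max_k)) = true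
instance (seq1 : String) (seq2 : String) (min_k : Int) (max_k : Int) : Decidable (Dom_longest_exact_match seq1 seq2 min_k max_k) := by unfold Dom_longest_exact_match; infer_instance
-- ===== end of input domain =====

-- B replaces A's linear scan over k by a binary search (shared-kmer existence is
-- monotone in k) and computes each shared set in one pass over seq1 against a set
-- of seq2's k-mers; return values are proved identical on all inputs.

-- ===== PORT A =====
def compute_kmers (seq : String) (k : Int) : PySem.Set String :=
  (PySem.List.pyRange 0 (PySem.Str.len seq - k + 1) 1).foldl
    (fun kmers i => PySem.Set.add kmers (PySem.Str.slice seq (some i) (some (i + k))))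
    PySem.Set.empty

def find_shared_kmers (seq1 : String) (seq2 : String) (k : Int) : PySem.Set String :=
  PySem.Set.inter (compute_kmers seq1 k) (compute_kmers seq2 k)

-- the 'for k in range(min_k, max_k+1)' loop with its break, state = (best_k, best_shared)
def lemLoopA (seq1 : String) (seq2 : String) : List Int → Int × List String → Int × List String
  | [], st => st
  | k :: ks, st =>
    let shared := find_shared_kmers seq1 seq2 k
    if shared ≠ [] then lemLoopA seq1 seq2 ks (k, shared) else st

def longest_exact_match (seq1 : String) (seq2 : String) (min_k : Int) (max_k : Int) : Int × List String :=
  lemLoopA seq1 seq2 (PySem.List.pyRange min_k (max_k + 1) 1) (0, PySem.Set.empty)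

-- ===== PORT B =====
def shared_kmers_alt (seq1 : String) (seq2 : String) (k : Int) : PySem.Set String :=
  let window2 := (PySem.List.pyRange 0 (PySem.Str.len seq2 - k + 1) 1).foldl
      (fun s i => PySem.Set.add s (PySem.Str.slice seq2 (some i) (some (i + k))))
      PySem.Set.empty
  (PySem.List.pyRange 0 (PySem.Str.len seq1 - k + 1) 1).foldl
    (fun out i =>
      let w := PySem.Str.slice seq1 (some i) (some (i + k))
      if PySem.Set.contains window2 w then PySem.Set.add out w else out)
    PySem.Set.empty

-- midpoint bounds, cited by lemBsearch's decreasing_by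
theorem lemMid_bounds {lo hi : Int} (h : lo < hi) :
    lo < PySem.Int.floordiv (lo + hi + 1) 2 ∧ PySem.Int.floordiv (lo + hi + 1) 2 ≤ hi := by
  rw [PySem.Int.floordiv_eq_ediv_of_pos (by norm_num)]
  omega

-- the 'while lo < hi' binary-search loop of B
def lemBsearch (seq1 : String) (seq2 : String) (lo hi : Int) : Int :=
  if h : lo < hi then
    let mid := PySem.Int.floordiv (lo + hi + 1) 2
    if shared_kmers_alt seq1 seq2 mid ≠ [] then
      lemBsearch seq1 seq2 mid hi
    else
      lemBsearch seq1 seq2 lo (mid - 1)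
  else lo
termination_by (hi - lo).toNat
decreasing_by
  · have hm := lemMid_bounds h; omega
  · have hm := lemMid_bounds h; omega

def longest_exact_match_alt (seq1 : String) (seq2 : String) (min_k : Int) (max_k : Int) : Int × List String :=
  if max_k < min_k ∨ shared_kmers_alt seq1 seq2 min_k = [] then (0, PySem.Set.empty)
  else
    let lo := lemBsearch seq1 seq2 min_k max_k
    (lo, shared_kmers_alt seq1 seq2 lo)

-- ===== PRECONDITION & SPEC =====
def Spec_longest_exact_match (seq1 : String) (seq2 : String) (min_k : Int) (max_k : Int) (out : Int × List String) : Prop := out = longest_exact_match_alt seq1 seq2 min_k max_k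
instance (seq1 : String) (seq2 : String) (min_k : Int) (max_k : Int) (out : Int × List String) : Decidable (Spec_longest_exact_match seq1 seq2 min_k max_k out) := by unfold Spec_longest_exact_match; infer_instance

-- ===== CLAIM (what is proved, stated in full; the proofs are below) =====
def Claim_equal_longest_exact_match : Prop := ∀ (seq1 : String) (seq2 : String) (min_k : Int) (max_k : Int), Dom_longest_exact_match seq1 seq2 min_k max_k → Spec_longest_exact_match seq1 seq2 min_k max_k (longest_exact_match seq1 seq2 min_k max_k)

-- ===== LEMMAS AND PROOFS =====

-- membership in compute_kmers
theorem compute_kmers_eq_ofList (seq : String) (k : Int) :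
    compute_kmers seq k
      = PySem.Set.ofList ((PySem.List.pyRange 0 (PySem.Str.len seq - k + 1) 1).map
          (fun i => PySem.Str.slice seq (some i) (some (i + k)))) := by
  unfold compute_kmers
  rw [PySem.Set.ofList_eq_foldl, List.foldl_map]
  rfl

theorem mem_compute_kmers (seq : String) (k : Int) (x : String) :
    x ∈ compute_kmers seq k ↔
      ∃ i ∈ PySem.List.pyRange 0 (PySem.Str.len seq - k + 1) 1,
        x = PySem.Str.slice seq (some i) (some (i + k)) := by
  rw [compute_kmers_eq_ofList, PySem.Set.mem_ofList]
  simp only [List.mem_map]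
  exact ⟨fun ⟨i, hi, e⟩ => ⟨i, hi, e.symm⟩, fun ⟨i, hi, e⟩ => ⟨i, hi, e.symm⟩⟩

theorem mem_find_shared (seq1 seq2 : String) (k : Int) (x : String) :
    x ∈ find_shared_kmers seq1 seq2 k ↔ x ∈ compute_kmers seq1 k ∧ x ∈ compute_kmers seq2 k := by
  unfold find_shared_kmers
  exact PySem.Set.mem_inter _ _ _

-- the empty string is a k-mer of every string, for k ≤ 0 (witness i = len seq)
theorem empty_mem_kmers (seq : String) (k : Int) (hk : k ≤ 0) : "" ∈ compute_kmers seq k := by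
  rw [mem_compute_kmers]
  refine ⟨PySem.Str.len seq, ?_, ?_⟩
  · rw [PySem.List.mem_pyRange_one]
    have : (0:Int) ≤ PySem.Str.len seq := by
      rw [PySem.Str.len_eq]; positivity
    omega
  · rw [← String.toList_inj]
    have hnil : PySem.List.slice seq.toList (some (PySem.Str.len seq)) (some (PySem.Str.len seq + k)) = [] := by
      have hc1 : PySem.List.clampIdx seq.toList.length (PySem.Str.len seq) = seq.toList.length := by
        rw [PySem.Str.len_eq, PySem.List.clampIdx_natCast]; simp
      have hc2 : PySem.List.clampIdx seq.toList.length (PySem.Str.len seq + k) ≤ seq.toList.length :=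
        PySem.List.clampIdx_le _ _
      have hlen := PySem.List.length_slice (xs := seq.toList) (a := PySem.Str.len seq)
        (b := PySem.Str.len seq + k)
      apply List.eq_nil_of_length_eq_zero
      omega
    rw [PySem.Str.toList_slice, PySem.Chars.slice_eq_listSlice, hnil]
    rfl

-- k ≤ 0 → the shared set is nonempty (it contains "")
theorem shared_nonpos (seq1 seq2 : String) (k : Int) (hk : k ≤ 0) :
    find_shared_kmers seq1 seq2 k ≠ [] := by
  have h : "" ∈ find_shared_kmers seq1 seq2 k := by
    rw [mem_find_shared]
    exact ⟨empty_mem_kmers seq1 k hk, empty_mem_kmers seq2 k hk⟩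
  exact List.ne_nil_of_mem h

-- monotonicity: a shared (k+1)-mer yields a shared k-mer
theorem shared_mono_step (seq1 seq2 : String) (k : Int)
    (h : find_shared_kmers seq1 seq2 (k + 1) ≠ []) :
    find_shared_kmers seq1 seq2 k ≠ [] := by
  by_cases hk : k ≤ 0
  · exact shared_nonpos seq1 seq2 k hk
  · have hk' : 0 < k := by omega
    obtain ⟨x, hx⟩ := List.exists_mem_of_ne_nil _ h
    rw [mem_find_shared] at hx
    obtain ⟨hx1, hx2⟩ := hx
    rw [mem_compute_kmers] at hx1 hx2
    obtain ⟨i, hi, hxi⟩ := hx1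
    obtain ⟨j, hj, hxj⟩ := hx2
    rw [PySem.List.mem_pyRange_one] at hi hj
    apply List.ne_nil_of_mem (a := PySem.Str.slice seq1 (some i) (some (i + k)))
    rw [mem_find_shared]
    constructor
    · rw [mem_compute_kmers]
      exact ⟨i, by rw [PySem.List.mem_pyRange_one]; omega, rfl⟩
    · rw [mem_compute_kmers]
      refine ⟨j, by rw [PySem.List.mem_pyRange_one]; omega, ?_⟩
      rw [← String.toList_inj]
      have hbig : PySem.List.slice seq1.toList (some i) (some (i + (k + 1)))
          = PySem.List.slice seq2.toList (some j) (some (j + (k + 1))) := by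
        have hx := congrArg String.toList (hxi.symm.trans hxj)
        simpa [PySem.Str.toList_slice, PySem.Chars.slice_eq_listSlice] using hx
      rw [PySem.Str.toList_slice, PySem.Chars.slice_eq_listSlice,
          PySem.Str.toList_slice, PySem.Chars.slice_eq_listSlice]
      rw [PySem.List.slice_toNat (a := i) (b := i + k) seq1.toList (by omega) (by omega),
          PySem.List.slice_toNat (a := j) (b := j + k) seq2.toList (by omega) (by omega)]
      rw [PySem.List.slice_toNat (a := i) (b := i + (k + 1)) seq1.toList (by omega) (by omega),
          PySem.List.slice_toNat (a := j) (b := j + (k + 1)) seq2.toList (by omega) (by omega)] at hbig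
      have e1 : (i + k).toNat - i.toNat = k.toNat := by omega
      have e2 : (j + k).toNat - j.toNat = k.toNat := by omega
      have E1 : (i + (k + 1)).toNat - i.toNat = k.toNat + 1 := by omega
      have E2 : (j + (k + 1)).toNat - j.toNat = k.toNat + 1 := by omega
      rw [e1, e2]
      rw [E1, E2] at hbig
      calc List.take k.toNat (List.drop i.toNat seq1.toList)
          = List.take k.toNat (List.take (k.toNat + 1) (List.drop i.toNat seq1.toList)) := by
            rw [List.take_take]; congr 1; omega
        _ = List.take k.toNat (List.take (k.toNat + 1) (List.drop j.toNat seq2.toList)) := by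
            rw [hbig]
        _ = List.take k.toNat (List.drop j.toNat seq2.toList) := by
            rw [List.take_take]; congr 1; omega

-- downward closure
theorem shared_mono_le (seq1 seq2 : String) (j k : Int) (hjk : j ≤ k)
    (h : find_shared_kmers seq1 seq2 k ≠ []) :
    find_shared_kmers seq1 seq2 j ≠ [] := by
  have key : ∀ n : Nat, find_shared_kmers seq1 seq2 (k - n) ≠ [] := by
    intro n
    induction n with
    | zero => simpa using h
    | succ m ih =>
      have hstep := shared_mono_step seq1 seq2 (k - ((m : Int) + 1)) (by
        have hcast : k - ((m : Int) + 1) + 1 = k - (m : Int) := by ring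
        rw [hcast]; exact ih)
      have hc : ((m + 1 : Nat) : Int) = (m : Int) + 1 := by push_cast; ring
      rw [hc]
      exact hstep
  have := key (k - j).toNat
  have hj : k - ((k - j).toNat : Int) = j := by omega
  rwa [hj] at this

-- B's per-k shared set equals A's
theorem foldl_add_filter (p : String → Bool) :
    ∀ (l s : List String),
      (l.filter p).foldl PySem.Set.add (s.filter p) = (l.foldl PySem.Set.add s).filter p := by
  intro l
  induction l with
  | nil => intro s; rfl
  | cons x l ih =>
    intro s
    have key : (PySem.Set.add s x).filter p
        = if p x then PySem.Set.add (s.filter p) x else s.filter p := by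
      rw [PySem.Set.add_eq_ite]
      by_cases hx : x ∈ s
      · rw [if_pos hx]
        by_cases hp : p x
        · rw [if_pos hp, PySem.Set.add_of_mem (List.mem_filter.mpr ⟨hx, hp⟩)]
        · rw [if_neg hp]
      · rw [if_neg hx, List.filter_append]
        by_cases hp : p x
        · rw [if_pos hp, PySem.Set.add_of_not_mem (fun hmem => hx (List.mem_filter.mp hmem).1)]
          simp [hp]
        · simp [hp]
    simp only [List.filter_cons]
    by_cases hp : p x
    · simp only [if_pos hp, List.foldl_cons]
      rw [show PySem.Set.add (List.filter p s) x = (PySem.Set.add s x).filter p by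
        rw [key, if_pos hp]]
      exact ih (PySem.Set.add s x)
    · simp only [if_neg hp, List.foldl_cons]
      rw [show List.filter p s = (PySem.Set.add s x).filter p by rw [key, if_neg hp]]
      exact ih (PySem.Set.add s x)

theorem ofList_filter_comm (p : String → Bool) (l : List String) :
    PySem.Set.ofList (l.filter p) = (PySem.Set.ofList l).filter p := by
  have h := foldl_add_filter p l []
  simpa [PySem.Set.ofList_eq_foldl] using h

theorem foldl_filter_add (W : List String) (f : Int → String) (l : List Int) :
    l.foldl (fun out i => if PySem.Set.contains W (f i) then PySem.Set.add out (f i) else out)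
        PySem.Set.empty
      = PySem.Set.ofList ((l.map f).filter (fun w => PySem.Set.contains W w)) := by
  rw [PySem.Set.ofList_eq_foldl, List.foldl_filter, List.foldl_map]
  rfl

theorem shared_alt_eq (seq1 seq2 : String) (k : Int) :
    shared_kmers_alt seq1 seq2 k = find_shared_kmers seq1 seq2 k := by
  unfold find_shared_kmers
  show (PySem.List.pyRange 0 (PySem.Str.len seq1 - k + 1) 1).foldl
      (fun out i =>
        if PySem.Set.contains (compute_kmers seq2 k) (PySem.Str.slice seq1 (some i) (some (i + k)))
        then PySem.Set.add out (PySem.Str.slice seq1 (some i) (some (i + k))) else out)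
      PySem.Set.empty
    = PySem.Set.inter (compute_kmers seq1 k) (compute_kmers seq2 k)
  rw [foldl_filter_add (compute_kmers seq2 k)
      (fun i => PySem.Str.slice seq1 (some i) (some (i + k)))]
  rw [compute_kmers_eq_ofList seq1, ofList_filter_comm]
  rfl

-- "good" results: what both loops compute
def lemGood (seq1 seq2 : String) (lo hi r : Int) : Prop :=
  lo ≤ r ∧ r ≤ hi ∧ find_shared_kmers seq1 seq2 r ≠ [] ∧
    (r = hi ∨ find_shared_kmers seq1 seq2 (r + 1) = [])

theorem lemGood_unique (seq1 seq2 : String) (lo hi r1 r2 : Int)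
    (h1 : lemGood seq1 seq2 lo hi r1) (h2 : lemGood seq1 seq2 lo hi r2) : r1 = r2 := by
  obtain ⟨l1, u1, p1, e1⟩ := h1
  obtain ⟨l2, u2, p2, e2⟩ := h2
  rcases lt_trichotomy r1 r2 with h | h | h
  · rcases e1 with e1 | e1
    · omega
    · exact absurd (shared_mono_le seq1 seq2 (r1 + 1) r2 (by omega) p2) (by simp [e1])
  · exact h
  · rcases e2 with e2 | e2
    · omega
    · exact absurd (shared_mono_le seq1 seq2 (r2 + 1) r1 (by omega) p1) (by simp [e2])

theorem loopA_spec (seq1 seq2 : String) (hi : Int) :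
    ∀ (n : Nat) (lo : Int) (st : Int × List String), (hi + 1 - lo).toNat = n →
      (lemLoopA seq1 seq2 (PySem.List.pyRange lo (hi + 1) 1) st = st ∧
        (hi < lo ∨ find_shared_kmers seq1 seq2 lo = [])) ∨
      (∃ r, lemLoopA seq1 seq2 (PySem.List.pyRange lo (hi + 1) 1) st =
              (r, find_shared_kmers seq1 seq2 r) ∧ lemGood seq1 seq2 lo hi r) := by
  intro n
  induction n using Nat.strong_induction_on with
  | _ n ih =>
    intro lo st hn
    by_cases hlo : hi < lo
    · left
      rw [PySem.List.pyRange_one_eq_nil (by omega)]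
      exact ⟨rfl, Or.inl hlo⟩
    · rw [PySem.List.pyRange_one_cons (by omega)]
      by_cases hsh : find_shared_kmers seq1 seq2 lo = []
      · left
        simp [lemLoopA, hsh]
      · have hrec := ih (hi + 1 - (lo + 1)).toNat (by omega) (lo + 1)
          (lo, find_shared_kmers seq1 seq2 lo) rfl
        right
        rcases hrec with ⟨heq, hc⟩ | ⟨r, heq, hg⟩
        · refine ⟨lo, ?_, le_refl lo, by omega, hsh, ?_⟩
          · simp only [lemLoopA, if_pos hsh]
            exact heq
          · rcases hc with hc | hc
            · left; omega
            · right; exact hc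
        · refine ⟨r, ?_, ?_⟩
          · simp only [lemLoopA, if_pos hsh]
            exact heq
          · obtain ⟨a, b, c, d⟩ := hg
            exact ⟨by omega, b, c, d⟩

theorem bsearch_spec (seq1 seq2 : String) :
    ∀ (n : Nat) (lo hi : Int), (hi - lo).toNat = n → lo ≤ hi →
      find_shared_kmers seq1 seq2 lo ≠ [] →
      lemGood seq1 seq2 lo hi (lemBsearch seq1 seq2 lo hi) := by
  intro n
  induction n using Nat.strong_induction_on with
  | _ n ih =>
    intro lo hi hn hle hP
    rw [lemBsearch]
    by_cases h : lo < hi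
    · rw [dif_pos h]
      have hm := lemMid_bounds h
      by_cases hmid : shared_kmers_alt seq1 seq2 (PySem.Int.floordiv (lo + hi + 1) 2) ≠ []
      · simp only [if_pos hmid]
        have hmid' : find_shared_kmers seq1 seq2 (PySem.Int.floordiv (lo + hi + 1) 2) ≠ [] := by
          rwa [shared_alt_eq] at hmid
        have := ih (hi - PySem.Int.floordiv (lo + hi + 1) 2).toNat (by omega)
          (PySem.Int.floordiv (lo + hi + 1) 2) hi rfl (by omega) hmid'
        obtain ⟨a, b, c, d⟩ := this
        exact ⟨by omega, b, c, d⟩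
      · simp only [if_neg hmid]
        have hmid' : find_shared_kmers seq1 seq2 (PySem.Int.floordiv (lo + hi + 1) 2) = [] := by
          have := hmid; rw [shared_alt_eq] at this; simpa using this
        have := ih (PySem.Int.floordiv (lo + hi + 1) 2 - 1 - lo).toNat (by omega)
          lo (PySem.Int.floordiv (lo + hi + 1) 2 - 1) rfl (by omega) hP
        obtain ⟨a, b, c, d⟩ := this
        refine ⟨a, by omega, c, ?_⟩
        rcases d with d | d
        · right; rw [d]; simpa using hmid'
        · right; exact d
    · rw [dif_neg h]
      exact ⟨le_refl lo, hle, hP, Or.inl (by omega)⟩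

-- ===== VERDICT (by name: the statement is the Claim_ definition above) =====
theorem longest_exact_match_spec : Claim_equal_longest_exact_match := by
  intro seq1 seq2 min_k max_k _
  unfold Spec_longest_exact_match longest_exact_match longest_exact_match_alt
  by_cases hgt : max_k < min_k
  · rw [PySem.List.pyRange_one_eq_nil (by omega), if_pos (Or.inl hgt)]
    rfl
  · by_cases h0 : find_shared_kmers seq1 seq2 min_k = []
    · rw [if_pos (Or.inr (by rw [shared_alt_eq]; exact h0))]
      rw [PySem.List.pyRange_one_cons (by omega)]
      simp [lemLoopA, h0]
    · rw [if_neg (not_or.mpr ⟨by omega, by rw [shared_alt_eq]; exact h0⟩)]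
      have hA := loopA_spec seq1 seq2 max_k (max_k + 1 - min_k).toNat min_k
        (0, PySem.Set.empty) rfl
      have hB := bsearch_spec seq1 seq2 (max_k - min_k).toNat min_k max_k rfl
        (by omega) h0
      rcases hA with ⟨_, hc⟩ | ⟨r, heq, hg⟩
      · rcases hc with hc | hc
        · omega
        · exact absurd hc h0
      · rw [heq]
        have hr : r = lemBsearch seq1 seq2 min_k max_k :=
          lemGood_unique seq1 seq2 min_k max_k r _ hg hB
        show (r, find_shared_kmers seq1 seq2 r)
          = (lemBsearch seq1 seq2 min_k max_k,
             shared_kmers_alt seq1 seq2 (lemBsearch seq1 seq2 min_k max_k))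
        rw [hr, shared_alt_eq]
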